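-- pv_equiv track=rewrite | github.com/sunpeil/ieeextreme15 | expressionevaluation.py | for_find_jia
-- ===== SOURCE A (Python) =====
-- def for_find_jia(l,i,flag):
--     if i < 0:
--         return False
--     try:
--         x = int(l[i])
--         return True
--     except ValueError:
--         if flag == False:
--             if l[i] == '+' or l[i] == '*' or l[i] == '-':
--                 return False
--             else:
--                 if l[i] == '(':
--                     flag = True
--                 return for_find_jia(l, i - 1, flag)
--         else:
--             if l[i] == '+' or l[i] == '-':
--                 return False
--             else:
--                 if l[i] == '(':
--                     flag = True
--                 return for_find_jia(l, i - 1, flag)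
-- ===== SOURCE B (Python) =====
-- def for_find_jia(l, i, flag):
--     if i < 0:
--         return False
--     for tok in reversed(l[:i + 1]):
--         try:
--             int(tok)
--             return True
--         except ValueError:
--             pass
--         if tok in (('+', '-') if flag else ('+', '*', '-')):
--             return False
--         if tok == '(':
--             flag = True
--     return False
-- ===== Notes on version B (the rewrite author's own statement) =====
-- stated objective: idiomatic
-- what changed: Replaces A's index-based recursion with an iterative scan over the reversed prefix l[:i+1], threading flag as a loop variable and using early returns instead of recursive calls.
import Mathlib
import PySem

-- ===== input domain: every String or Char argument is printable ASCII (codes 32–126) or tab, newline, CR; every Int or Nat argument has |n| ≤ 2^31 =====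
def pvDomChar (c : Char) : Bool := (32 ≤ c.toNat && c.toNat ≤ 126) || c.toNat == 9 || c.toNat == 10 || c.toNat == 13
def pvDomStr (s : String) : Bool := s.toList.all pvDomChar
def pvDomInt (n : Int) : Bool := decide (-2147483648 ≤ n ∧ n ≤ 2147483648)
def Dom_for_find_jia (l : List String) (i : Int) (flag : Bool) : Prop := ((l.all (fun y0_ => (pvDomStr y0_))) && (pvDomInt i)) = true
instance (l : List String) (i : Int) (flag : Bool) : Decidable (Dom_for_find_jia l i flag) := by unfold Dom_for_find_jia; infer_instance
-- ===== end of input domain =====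

-- B replaces A's index recursion by an iterative scan over the reversed prefix l[:i+1] (idiomatic; same cost).

-- ===== PORT A =====
-- Literal transliteration of A's recursion; `int(l[i])` is PySem.Int.ofStr?, `l[i]` is pyGet?
-- (the `none` branch of pyGet? is Python's uncaught IndexError, excluded by Pre_).
def for_find_jia (l : List String) (i : Int) (flag : Bool) : Bool :=
  if _h : i < 0 then false
  else
    match PySem.List.pyGet? l i with
    | none => false   -- IndexError in Python; outside Pre_for_find_jia
    | some s =>
      match PySem.Int.ofStr? s with
      | some _ => true
      | none =>
        if flag = false then
          if s = "+" || s = "*" || s = "-" then false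
          else for_find_jia l (i - 1) (if s = "(" then true else flag)
        else
          if s = "+" || s = "-" then false
          else for_find_jia l (i - 1) (if s = "(" then true else flag)
termination_by (i + 1).toNat
decreasing_by all_goals omega

-- ===== PORT B =====
-- B's loop `for tok in reversed(l[:i+1])` with early returns, flag threaded as loop state.
def pvScanBack : List String → Bool → Bool
  | [], _ => false
  | tok :: rest, flag =>
    match PySem.Int.ofStr? tok with
    | some _ => true
    | none =>
      if (if flag then tok = "+" || tok = "-" else tok = "+" || tok = "*" || tok = "-") then false
      else pvScanBack rest (flag || tok = "(")

def for_find_jia_alt (l : List String) (i : Int) (flag : Bool) : Bool :=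
  if i < 0 then false
  else pvScanBack (PySem.List.slice l none (some (i + 1))).reverse flag

-- ===== PRECONDITION & SPEC =====
-- Pre_ excludes exactly 0 ≤ i ≥ len(l), where A's l[i] raises an uncaught IndexError.
def Pre_for_find_jia (l : List String) (i : Int) (flag : Bool) : Prop := i < (l.length : Int)
instance (l : List String) (i : Int) (flag : Bool) : Decidable (Pre_for_find_jia l i flag) := by unfold Pre_for_find_jia; infer_instance

def pvWitness_for_find_jia : List String × Int × Bool := (["+", "3"], 1, false)

def Spec_for_find_jia (l : List String) (i : Int) (flag : Bool) (out : Bool) : Prop := out = for_find_jia_alt l i flag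
instance (l : List String) (i : Int) (flag : Bool) (out : Bool) : Decidable (Spec_for_find_jia l i flag out) := by unfold Spec_for_find_jia; infer_instance

-- ===== CLAIM (what is proved, stated in full; the proofs are below) =====
def Claim_equal_for_find_jia : Prop := ∀ (l : List String) (i : Int) (flag : Bool), Dom_for_find_jia l i flag → Pre_for_find_jia l i flag → Spec_for_find_jia l i flag (for_find_jia l i flag)


-- ===== LEMMAS AND PROOFS =====

-- A at a natural index n < len(l) computes B's scan of the reversed prefix take (n+1) l.
lemma for_find_jia_eq_scan (n : Nat) : ∀ (l : List String) (flag : Bool), n < l.length →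
    for_find_jia l (n : Int) flag = pvScanBack ((l.take (n + 1)).reverse) flag := by
  induction n with
  | zero =>
    intro l flag h
    rw [for_find_jia]
    simp only [List.take_add_one, List.take_zero, List.nil_append, List.getElem?_eq_getElem h]
    have h0 : ¬ ((0 : Int) < 0) := by omega
    simp only [PySem.List.pyGet?_natCast, List.getElem?_eq_getElem h,
      Option.toList_some, List.reverse_cons, List.reverse_nil, List.nil_append]
    cases hx : PySem.Int.ofStr? l[0] with
    | some v => simp [pvScanBack, hx]
    | none =>
      cases flag <;> simp [pvScanBack, hx] <;> intros <;> (rw [for_find_jia]; simp)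
  | succ m ih =>
    intro l flag h
    rw [for_find_jia]
    have h0 : ¬ (((m + 1 : Nat) : Int) < 0) := by omega
    simp only [h0, dite_false, PySem.List.pyGet?_natCast, List.getElem?_eq_getElem h]
    have hsucc : (l.take (m + 1 + 1)).reverse = l[m + 1] :: (l.take (m + 1)).reverse := by
      rw [List.take_add_one, List.getElem?_eq_getElem h]; simp
    rw [hsucc]
    cases hx : PySem.Int.ofStr? l[m + 1] with
    | some v => simp [pvScanBack, hx]
    | none =>
      have hm : m < l.length := by omega
      cases flag <;> simp [pvScanBack, hx] <;> rw [ih l _ hm]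

theorem for_find_jia_spec : Claim_equal_for_find_jia := by
  intro l i flag _ hpre
  unfold Spec_for_find_jia for_find_jia_alt
  by_cases hneg : i < 0
  · rw [for_find_jia]; simp [hneg]
  · have h0 : 0 ≤ i := by omega
    have h1 : 0 ≤ i + 1 := by omega
    rw [if_neg hneg, PySem.List.slice_to l h1]
    have hi : i = ((i.toNat : Nat) : Int) := by omega
    have hlen : i.toNat < l.length := by
      unfold Pre_for_find_jia at hpre; omega
    have htn : (i + 1).toNat = i.toNat + 1 := by omega
    rw [htn, hi]
    exact for_find_jia_eq_scan i.toNat l flag hlen
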